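/- GENERATED by mk_final_copies.py from the proof of the farm's unit `iter_54` (farm:iter_54.1: Proof.lean) as the
   re-elaboration sweep compiled it — do not edit. -/
import Asan.CheckWalk
import Vorbis.Spec.Units.iter_54

open X86 X86.User Asan Vorbis

set_option maxRecDepth 4000
set_option maxHeartbeats 4000000

/-- `iter_54(z)` satisfies its contract: 80 straight-line instructions, eight `load4` checks of `z[0 .. -7]`, eight unchecked
float stores to the same addresses (each checked as a load before), three float scratch slots on its own stack.

The walk is cut after every second check call (`L.iter_54.ret2 / ret4 / ret6 / ret8`) only to `clear w_zmm`: a check call makes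
the walker track the vector registers (`w_zmm`), no Spec here speaks of them, and the tracked term grows with every SSE
instruction until the steps take minutes. -/
theorem Vorbis.Spec.Worked.iter_54_ok : Vorbis.Spec.iter_54.Statement := by
  intro Lay hLay μ hμ u₀ hcode hload4 others frames u ret he hpre
  v_entry he
  obtain ⟨hsh, hz28, hlive⟩ := hpre
  -- where `z[-7 .. 0]` is: one arithmetic fact (inside the data space, off the text, off this function's stack)
  have hsp := hsh.rsp
  have hwhere := hlive.where_ hsh.inv hsh.offText (by decide) (by u_omega)
  -- 0x1066c0 … 0x1066dd, C 2582-2586: the four pushes, `sub rsp, 18H`, the checks of `z[0]` and `z[-4]`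
  u_walk hcode [hμ.vendor] until [Vorbis.L.iter_54.ret2] span [Vorbis.L.textLo, Vorbis.L.textHi] side (v_side)
  · -- 0x1066cd, C 2586: the check of `z[0]`
    have hun : ShadowUntouched u.mem s_1066cd.mem := by v_untouched
    exact hlive.accSmall hsh.inv hun _ 4 (by decide) (by u_omega) (by u_omega)
  · -- 0x1066d8, C 2586: the check of `z[-4]`
    have hun : ShadowUntouched u.mem s_1066d8.mem := by v_untouched
    exact hlive.accSmall hsh.inv hun _ 4 (by decide) (by u_omega) (by u_omega)
  try clear w_zmm
  -- 0x1066dd … 0x106713, C 2586-2588: `k00`, `y0` to their stack slots, the checks of `z[-2]` and `z[-6]`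
  u_walk hcode [hμ.vendor] until [Vorbis.L.iter_54.ret4] span [Vorbis.L.textLo, Vorbis.L.textHi] side (v_side)
  · -- 0x106702, C 2588: the check of `z[-2]`
    have hun : ShadowUntouched u.mem s_106702.mem := by v_untouched
    exact hlive.accSmall hsh.inv hun _ 4 (by decide) (by u_omega) (by u_omega)
  · -- 0x10670e, C 2588: the check of `z[-6]`
    have hun : ShadowUntouched u.mem s_10670e.mem := by v_untouched
    exact hlive.accSmall hsh.inv hun _ 4 (by decide) (by u_omega) (by u_omega)
  try clear w_zmm
  -- 0x106713 … 0x10675e, C 2588-2596: the stores of `z[0]`, `z[-2]`, the checks of `z[-3]` and `z[-7]`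
  u_walk hcode [hμ.vendor] until [Vorbis.L.iter_54.ret6] span [Vorbis.L.textLo, Vorbis.L.textHi] side (v_side)
  · -- 0x10674c, C 2596: the check of `z[-3]`
    have hun : ShadowUntouched u.mem s_10674c.mem := by v_untouched
    exact hlive.accSmall hsh.inv hun _ 4 (by decide) (by u_omega) (by u_omega)
  · -- 0x106759, C 2596: the check of `z[-7]`
    have hun : ShadowUntouched u.mem s_106759.mem := by v_untouched
    exact hlive.accSmall hsh.inv hun _ 4 (by decide) (by u_omega) (by u_omega)
  try clear w_zmm
  -- 0x10675e … 0x1067a0, C 2596-2603: the stores of `z[-4]`, `z[-6]`, the checks of `z[-1]` and `z[-5]`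
  u_walk hcode [hμ.vendor] until [Vorbis.L.iter_54.ret8] span [Vorbis.L.textLo, Vorbis.L.textHi] side (v_side)
  · -- 0x10678f, C 2603: the check of `z[-1]`
    have hun : ShadowUntouched u.mem s_10678f.mem := by v_untouched
    exact hlive.accSmall hsh.inv hun _ 4 (by decide) (by u_omega) (by u_omega)
  · -- 0x10679b, C 2603: the check of `z[-5]`
    have hun : ShadowUntouched u.mem s_10679b.mem := by v_untouched
    exact hlive.accSmall hsh.inv hun _ 4 (by decide) (by u_omega) (by u_omega)
  try clear w_zmm
  -- 0x1067a0 … 0x106800, C 2603-2611: the stores of `z[-1]`, `z[-3]`, `z[-5]`, `z[-7]`, the epilogue, the `ret`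
  u_walk hcode [hμ.vendor] span [Vorbis.L.textLo, Vorbis.L.textHi] side (v_side)
  -- the state after the `ret`: the contract's `Returned`
  refine ReachVia.done ?_
  v_returned
  show ShadowUntouched u.mem s_106800.mem
  v_untouched
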